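-- pv_equiv track=rewrite | github.com/pira12/appie-api | main.py | translate_dutch_date
-- ===== SOURCE A (Python) =====
-- DUTCH_TO_ENGLISH_DAYS = {
--     "maandag": "Monday",
--     "dinsdag": "Tuesday",
--     "woensdag": "Wednesday",
--     "donderdag": "Thursday",
--     "vrijdag": "Friday",
--     "zaterdag": "Saturday",
--     "zondag": "Sunday"
-- }
--
-- DUTCH_TO_ENGLISH_MONTHS = {
--     "januari": "January",
--     "februari": "February",
--     "maart": "March",
--     "april": "April",
--     "mei": "May",
--     "juni": "June",
--     "juli": "July",
--     "augustus": "August",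
--     "september": "September",
--     "oktober": "October",
--     "november": "November",
--     "december": "December"
-- }
--
-- def translate_dutch_date(dutch_date):
--     """Translate a Dutch date string into an English date string."""
--     # Replace day names
--     for dutch_day, english_day in DUTCH_TO_ENGLISH_DAYS.items():
--         if dutch_day in dutch_date:
--             dutch_date = dutch_date.replace(dutch_day, english_day)
--
--     # Replace month names
--     for dutch_month, english_month in DUTCH_TO_ENGLISH_MONTHS.items():
--         if dutch_month in dutch_date:
--             dutch_date = dutch_date.replace(dutch_month, english_month)
--
--     return dutch_date
-- ===== SOURCE B (Python) =====
-- PAIRS = [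
--     ("maandag", "Monday"),
--     ("dinsdag", "Tuesday"),
--     ("woensdag", "Wednesday"),
--     ("donderdag", "Thursday"),
--     ("vrijdag", "Friday"),
--     ("zaterdag", "Saturday"),
--     ("zondag", "Sunday"),
--     ("januari", "January"),
--     ("februari", "February"),
--     ("maart", "March"),
--     ("april", "April"),
--     ("mei", "May"),
--     ("juni", "June"),
--     ("juli", "July"),
--     ("augustus", "August"),
--     ("september", "September"),
--     ("oktober", "October"),
--     ("november", "November"),
--     ("december", "December"),
-- ]
--
--
-- def translate_dutch_date(dutch_date):
--     """Translate a Dutch date string into an English date string (single left-to-right scan)."""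
--     out = []
--     i = 0
--     n = len(dutch_date)
--     while i < n:
--         for dutch, english in PAIRS:
--             if dutch_date.startswith(dutch, i):
--                 out.append(english)
--                 i += len(dutch)
--                 break
--         else:
--             out.append(dutch_date[i])
--             i += 1
--     return "".join(out)
-- ===== Notes on version B (the rewrite author's own statement) =====
-- stated objective: alternative
-- what changed: Replaces A's 19 sequential full-string str.replace passes by one left-to-right scan that at each position emits the translation of the first matching Dutch name (or the character) and advances; correct because no Dutch name overlaps another or occurs in any English replacement.
import Mathlib
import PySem

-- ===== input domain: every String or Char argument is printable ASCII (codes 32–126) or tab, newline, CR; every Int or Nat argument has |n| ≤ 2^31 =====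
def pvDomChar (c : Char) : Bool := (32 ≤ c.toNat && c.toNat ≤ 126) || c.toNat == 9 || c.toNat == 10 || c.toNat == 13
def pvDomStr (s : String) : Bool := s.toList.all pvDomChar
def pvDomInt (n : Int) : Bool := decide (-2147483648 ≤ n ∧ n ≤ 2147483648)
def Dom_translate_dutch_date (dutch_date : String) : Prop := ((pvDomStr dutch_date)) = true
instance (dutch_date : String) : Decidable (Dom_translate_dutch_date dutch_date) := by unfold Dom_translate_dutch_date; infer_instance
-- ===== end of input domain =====

-- B replaces A's 19 sequential full-string replace passes by ONE left-to-right scan that at each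
-- position emits the translation of the first matching Dutch name (or copies the character);
-- a genuinely different traversal of the same cost (objective: alternative).

-- ===== PORT A =====
def pvDays : List (String × String) :=
  [("maandag", "Monday"), ("dinsdag", "Tuesday"), ("woensdag", "Wednesday"),
   ("donderdag", "Thursday"), ("vrijdag", "Friday"), ("zaterdag", "Saturday"),
   ("zondag", "Sunday")]

def pvMonths : List (String × String) :=
  [("januari", "January"), ("februari", "February"), ("maart", "March"),
   ("april", "April"), ("mei", "May"), ("juni", "June"), ("juli", "July"),
   ("augustus", "August"), ("september", "September"), ("oktober", "October"),
   ("november", "November"), ("december", "December")]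

-- one iteration of A's for-loops: `if dutch in s: s = s.replace(dutch, english)`
def pvStep (s : String) (kv : String × String) : String :=
  if PySem.Str.isIn kv.1 s then PySem.Str.replace s kv.1 kv.2 else s

def translate_dutch_date (dutch_date : String) : String :=
  pvMonths.foldl pvStep (pvDays.foldl pvStep dutch_date)

-- ===== PORT B =====
-- the merged PAIRS table of Source B, as char lists
def pvTrans : List (List Char × List Char) :=
  [("maandag".toList, "Monday".toList), ("dinsdag".toList, "Tuesday".toList),
   ("woensdag".toList, "Wednesday".toList), ("donderdag".toList, "Thursday".toList),
   ("vrijdag".toList, "Friday".toList), ("zaterdag".toList, "Saturday".toList),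
   ("zondag".toList, "Sunday".toList), ("januari".toList, "January".toList),
   ("februari".toList, "February".toList), ("maart".toList, "March".toList),
   ("april".toList, "April".toList), ("mei".toList, "May".toList),
   ("juni".toList, "June".toList), ("juli".toList, "July".toList),
   ("augustus".toList, "August".toList), ("september".toList, "September".toList),
   ("oktober".toList, "October".toList), ("november".toList, "November".toList),
   ("december".toList, "December".toList)]

lemma pvTrans_keys_ne_nil : ∀ kv ∈ pvTrans, kv.1 ≠ [] := by decide

-- Source B's while loop: at the current position, the inner for finds the first pair whose Dutch
-- name starts here (emit its English name, skip it), else copy one character.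
def pvScan (s : List Char) : List Char :=
  match hf : pvTrans.find? (fun kv => kv.1.isPrefixOf s) with
  | some kv => kv.2 ++ pvScan (s.drop kv.1.length)
  | none =>
    match s with
    | [] => []
    | c :: t => c :: pvScan t
termination_by s.length
decreasing_by
  · have hmem := List.mem_of_find?_eq_some hf
    have hp : kv.1 <+: s := List.isPrefixOf_iff_prefix.mp (by simpa using List.find?_some hf)
    have h1 : 0 < kv.1.length := List.length_pos_of_ne_nil (pvTrans_keys_ne_nil kv hmem)
    have h2 : kv.1.length ≤ s.length := hp.length_le
    simp only [List.length_drop]; omega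
  · simp

def translate_dutch_date_alt (dutch_date : String) : String :=
  String.ofList (pvScan dutch_date.toList)

-- ===== PRECONDITION & SPEC =====
def Spec_translate_dutch_date (dutch_date : String) (out : String) : Prop := out = translate_dutch_date_alt dutch_date
instance (dutch_date : String) (out : String) : Decidable (Spec_translate_dutch_date dutch_date out) := by unfold Spec_translate_dutch_date; infer_instance

-- ===== CLAIM (what is proved, stated in full; the proofs are below) =====
def Claim_equal_translate_dutch_date : Prop := ∀ (dutch_date : String), Dom_translate_dutch_date dutch_date → Spec_translate_dutch_date dutch_date (translate_dutch_date dutch_date)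

-- ===== LEMMAS AND PROOFS =====

-- unfolding equations of PySem.Chars.replace.go
lemma pv_go_zero (k v l acc : List Char) : PySem.Chars.replace.go k v 0 l acc = acc.reverse ++ l := rfl

lemma pv_go_nil (k v : List Char) (f : Nat) (acc : List Char) :
    PySem.Chars.replace.go k v (f+1) [] acc = acc.reverse := rfl

lemma pv_go_cons (k v : List Char) (f : Nat) (c : Char) (t acc : List Char) :
    PySem.Chars.replace.go k v (f+1) (c::t) acc =
      if k.isPrefixOf (c::t) then PySem.Chars.replace.go k v f (List.drop k.length (c::t)) (v.reverse ++ acc)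
      else PySem.Chars.replace.go k v f t (c :: acc) := rfl

-- the accumulator factors out
lemma pv_go_acc (k v : List Char) : ∀ (f : Nat) (l acc : List Char),
    PySem.Chars.replace.go k v f l acc = acc.reverse ++ PySem.Chars.replace.go k v f l [] := by
  intro f
  induction f with
  | zero => intro l acc; simp [pv_go_zero]
  | succ f ih =>
    intro l acc
    cases l with
    | nil => simp [pv_go_nil]
    | cons c t =>
      rw [pv_go_cons, pv_go_cons]
      by_cases h : k.isPrefixOf (c::t)
      · rw [if_pos h, if_pos h, ih _ (v.reverse ++ acc), ih _ (v.reverse ++ [])]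
        simp
      · rw [if_neg h, if_neg h, ih t (c :: acc), ih t (c :: [])]
        simp

-- fuel irrelevance (for nonempty pattern)
lemma pv_go_fuel (k v : List Char) (hk : k ≠ []) : ∀ (f1 f2 : Nat) (l acc : List Char),
    l.length ≤ f1 → l.length ≤ f2 →
    PySem.Chars.replace.go k v f1 l acc = PySem.Chars.replace.go k v f2 l acc := by
  intro f1
  induction f1 with
  | zero =>
    intro f2 l acc h1 _
    have : l = [] := List.eq_nil_of_length_eq_zero (Nat.le_zero.mp h1)
    subst this
    cases f2 with
    | zero => rfl
    | succ f2 => simp [pv_go_zero, pv_go_nil]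
  | succ f1 ih =>
    intro f2 l acc h1 h2
    cases l with
    | nil =>
      cases f2 with
      | zero => simp [pv_go_zero, pv_go_nil]
      | succ f2 => rfl
    | cons c t =>
      cases f2 with
      | zero => simp at h2
      | succ f2 =>
        rw [pv_go_cons, pv_go_cons]
        by_cases h : k.isPrefixOf (c::t)
        · rw [if_pos h, if_pos h]
          have hkl : 0 < k.length := List.length_pos_of_ne_nil hk
          apply ih <;> simp [List.length_drop] at * <;> omega
        · rw [if_neg h, if_neg h]
          apply ih <;> simp at * <;> omega

lemma pv_replace_nil (k v : List Char) (hk : k ≠ []) : PySem.Chars.replace [] k v = [] := by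
  have : k.isEmpty = false := by simp [hk]
  simp [PySem.Chars.replace, this, pv_go_zero]

-- one-step unfolding of replace on a cons
lemma pv_replace_cons (k v : List Char) (hk : k ≠ []) (c : Char) (t : List Char) :
    PySem.Chars.replace (c::t) k v =
      if k.isPrefixOf (c::t) then v ++ PySem.Chars.replace (List.drop k.length (c::t)) k v
      else c :: PySem.Chars.replace t k v := by
  have hke : k.isEmpty = false := by simp [hk]
  have hkl : 0 < k.length := List.length_pos_of_ne_nil hk
  rw [PySem.Chars.replace, PySem.Chars.replace, PySem.Chars.replace]
  simp only [hke, Bool.false_eq_true, if_false, List.length_cons, pv_go_cons]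
  by_cases h : k.isPrefixOf (c::t)
  · rw [if_pos h, if_pos h, pv_go_acc]
    have hlen : (List.drop k.length (c::t)).length ≤ t.length := by
      simp [List.length_drop]; omega
    rw [pv_go_fuel k v hk t.length (List.drop k.length (c::t)).length _ _ hlen le_rfl]
    simp
  · rw [if_neg h, if_neg h, pv_go_acc]
    simp

lemma pv_replace_cons_neg (k v : List Char) (hk : k ≠ []) (c : Char) (t : List Char)
    (h : ¬ k <+: (c::t)) :
    PySem.Chars.replace (c::t) k v = c :: PySem.Chars.replace t k v := by
  rw [pv_replace_cons k v hk c t, if_neg (fun hb => h (List.isPrefixOf_iff_prefix.mp hb))]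

lemma pv_replace_front (k v t : List Char) (hk : k ≠ []) :
    PySem.Chars.replace (k ++ t) k v = v ++ PySem.Chars.replace t k v := by
  cases k with
  | nil => exact absurd rfl hk
  | cons a k' =>
    rw [List.cons_append, pv_replace_cons (a :: k') v hk a (k' ++ t),
        if_pos (List.isPrefixOf_iff_prefix.mpr (by
          rw [← List.cons_append]; exact List.prefix_append (a :: k') t)),
        ← List.cons_append, List.drop_left]

lemma pv_replace_eq_self (k v : List Char) (hk : k ≠ []) :
    ∀ s : List Char, ¬ k <:+: s → PySem.Chars.replace s k v = s := by
  intro s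
  induction s with
  | nil => intro _; exact pv_replace_nil k v hk
  | cons c t ih =>
    intro h
    rw [pv_replace_cons_neg k v hk c t (fun hp => h hp.isInfix),
        ih (fun hi => h (List.infix_cons hi))]

-- replace skips over a prefix in which the pattern cannot start
lemma pv_replace_append (k v : List Char) (hk : k ≠ []) :
    ∀ (p t : List Char), (∀ i < p.length, ¬(k <+: p.drop i) ∧ ¬(p.drop i <+: k)) →
      PySem.Chars.replace (p ++ t) k v = p ++ PySem.Chars.replace t k v := by
  intro p
  induction p with
  | nil => intro t _; rfl
  | cons c p' ih =>
    intro t hind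
    have h0 := hind 0 (by simp)
    have hnp : ¬ k <+: (c::p') ++ t := by
      intro hp
      by_cases hl : k.length ≤ (c::p').length
      · exact h0.1 (by simpa using
          List.prefix_of_prefix_length_le hp (List.prefix_append (c::p') t) hl)
      · exact h0.2 (by simpa using
          List.prefix_of_prefix_length_le (List.prefix_append (c::p') t) hp (by omega))
    rw [List.cons_append, pv_replace_cons_neg k v hk c (p' ++ t) (by simpa using hnp),
        ih t (fun i hi => hind (i+1) (by simpa using hi))]
    simp

-- a prefix that avoids the head of v already occurred before the replacement
lemma pv_prefix_replace (k v : List Char) (hk : k ≠ []) (hv : v ≠ []) :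
    ∀ (n : Nat) (s w : List Char), s.length ≤ n → (∀ c ∈ v.take 1, c ∉ w) →
      w <+: PySem.Chars.replace s k v → w <+: s := by
  intro n
  induction n with
  | zero =>
    intro s w hlen _ hw
    have : s = [] := List.eq_nil_of_length_eq_zero (Nat.le_zero.mp hlen)
    subst this
    rwa [pv_replace_nil k v hk] at hw
  | succ n ih =>
    intro s w hlen hhead hw
    by_cases hpre : k <+: s
    · obtain ⟨t, rfl⟩ := hpre
      rw [pv_replace_front k v t hk] at hw
      have hwnil : w = [] := by
        cases hwc : w with
        | nil => rfl
        | cons a w' =>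
          exfalso
          by_cases hl : w.length ≤ v.length
          · have hwv : w <+: v :=
              List.prefix_of_prefix_length_le hw (v.prefix_append _) hl
            obtain ⟨r, hr⟩ := hwv
            have hav : a ∈ v.take 1 := by rw [← hr, hwc]; simp
            exact hhead a hav (by simp [hwc])
          · have hvw : v <+: w :=
              List.prefix_of_prefix_length_le (v.prefix_append _) hw (by omega)
            cases hvc : v with
            | nil => exact hv hvc
            | cons b v' =>
              have hbv : b ∈ v.take 1 := by simp [hvc]
              exact hhead b hbv (hvw.subset (by simp [hvc]))
      simp [hwnil]
    · cases s with
      | nil =>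
        rwa [pv_replace_nil k v hk] at hw
      | cons c t =>
        rw [pv_replace_cons_neg k v hk c t hpre] at hw
        cases hwc : w with
        | nil => simp
        | cons a w' =>
          rw [hwc, List.cons_prefix_cons] at hw
          obtain ⟨rfl, hw'⟩ := hw
          have hw't : w' <+: t :=
            ih t w' (by simpa using Nat.lt_succ_iff.mp (by simpa using hlen))
              (fun x hx hmem => hhead x hx (by simp [hwc, hmem])) hw'
          exact List.cons_prefix_cons.mpr ⟨rfl, hw't⟩

-- === decidable facts about the concrete table ===
lemma pvF2 : ∀ kv ∈ pvTrans, kv.2 ≠ [] := by decide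

set_option maxRecDepth 4000 in
lemma pvF4 : pvTrans.Pairwise (fun e l =>
    ∀ i < l.1.length, ¬(e.1 <+: l.1.drop i) ∧ ¬(l.1.drop i <+: e.1)) := by decide

set_option maxRecDepth 2000 in
lemma pvF5b : (pvTrans.all fun kv => pvTrans.all fun kv' => (List.range kv.2.length).all fun i =>
    !((kv'.1.isPrefixOf (kv.2.drop i))) && !((kv.2.drop i).isPrefixOf kv'.1)) = true := by decide

lemma pvF5 : ∀ kv ∈ pvTrans, ∀ kv' ∈ pvTrans,
    ∀ i < kv.2.length, ¬(kv'.1 <+: kv.2.drop i) ∧ ¬(kv.2.drop i <+: kv'.1) := by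
  have h := pvF5b
  simp only [List.all_eq_true, List.mem_range, Bool.and_eq_true, Bool.not_eq_true'] at h
  intro kv hkv kv' hkv' i hi
  obtain ⟨h1, h2⟩ := h kv hkv kv' hkv' i hi
  constructor
  · intro hp; rw [← List.isPrefixOf_iff_prefix] at hp; rw [h1] at hp; cases hp
  · intro hp; rw [← List.isPrefixOf_iff_prefix] at hp; rw [h2] at hp; cases hp

set_option maxRecDepth 2000 in
lemma pvF6b : (pvTrans.all fun kv => pvTrans.all fun kv' => (kv.2.take 1).all fun c =>
    !(kv'.1.contains c)) = true := by decide

lemma pvF6 : ∀ kv ∈ pvTrans, ∀ kv' ∈ pvTrans, ∀ c ∈ kv.2.take 1, c ∉ kv'.1 := by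
  have h := pvF6b
  simp only [List.all_eq_true, Bool.not_eq_true'] at h
  intro kv hkv kv' hkv' c hc hmem
  have := h kv hkv kv' hkv' c hc
  simp only [List.contains_eq_mem, decide_eq_false_iff_not] at this
  exact this hmem

-- === the sequential-replace chain ===
def pvRep (s : List Char) (kv : List Char × List Char) : List Char :=
  PySem.Chars.replace s kv.1 kv.2

lemma pv_chain_nil : ∀ ps : List (List Char × List Char), (∀ kv ∈ ps, kv ∈ pvTrans) →
    ps.foldl pvRep [] = [] := by
  intro ps
  induction ps with
  | nil => intro _; rfl
  | cons kv ps' ih =>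
    intro h
    have hk := pvTrans_keys_ne_nil kv (h kv (by simp))
    simp only [List.foldl_cons, pvRep, pv_replace_nil kv.1 kv.2 hk]
    exact ih (fun x hx => h x (by simp [hx]))

lemma pv_chain_cons (c : Char) : ∀ (ps : List (List Char × List Char)) (t : List Char),
    (∀ kv ∈ ps, kv ∈ pvTrans) → (∀ kv ∈ ps, ¬ kv.1 <+: c :: t) →
    ps.foldl pvRep (c :: t) = c :: ps.foldl pvRep t := by
  intro ps
  induction ps with
  | nil => intro t _ _; rfl
  | cons kv ps' ih =>
    intro t hmem hnp
    have hkvt := hmem kv (by simp)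
    have hk := pvTrans_keys_ne_nil kv hkvt
    simp only [List.foldl_cons, pvRep,
      pv_replace_cons_neg kv.1 kv.2 hk c t (hnp kv (by simp))]
    apply ih
    · exact fun x hx => hmem x (by simp [hx])
    · intro kv' hkv' hp
      have hkv't := hmem kv' (by simp [hkv'])
      have hk' := pvTrans_keys_ne_nil kv' hkv't
      cases hkc : kv'.1 with
      | nil => exact hk' hkc
      | cons a w =>
        rw [hkc, List.cons_prefix_cons] at hp
        obtain ⟨rfl, hw⟩ := hp
        have hwt : w <+: t := by
          apply pv_prefix_replace kv.1 kv.2 hk (pvF2 kv hkvt) t.length t w le_rfl _ hw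
          intro x hx hmemw
          exact pvF6 kv hkvt kv' hkv't x hx (by simp [hkc, hmemw])
        exact hnp kv' (by simp [hkv']) (by rw [hkc, List.cons_prefix_cons]; exact ⟨rfl, hwt⟩)

lemma pv_chain_key (k : List Char) :
    ∀ (ps : List (List Char × List Char)) (u : List Char),
      (∀ kv ∈ ps, kv.1 ≠ [] ∧
        ∀ i < k.length, ¬(kv.1 <+: k.drop i) ∧ ¬(k.drop i <+: kv.1)) →
      ps.foldl pvRep (k ++ u) = k ++ ps.foldl pvRep u := by
  intro ps
  induction ps with
  | nil => intro u _; rfl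
  | cons kv' ps' ih =>
    intro u h
    obtain ⟨hk', hind⟩ := h kv' (by simp)
    show ps'.foldl pvRep (PySem.Chars.replace (k ++ u) kv'.1 kv'.2) =
      k ++ ps'.foldl pvRep (PySem.Chars.replace u kv'.1 kv'.2)
    rw [pv_replace_append kv'.1 kv'.2 hk' k u hind]
    exact ih (PySem.Chars.replace u kv'.1 kv'.2) (fun x hx => h x (by simp [hx]))

lemma pv_chain_val (k v : List Char) (hkv : (k, v) ∈ pvTrans) :
    ∀ (ps : List (List Char × List Char)) (u : List Char),
      (∀ kv ∈ ps, kv ∈ pvTrans) →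
      ps.foldl pvRep (v ++ u) = v ++ ps.foldl pvRep u := by
  intro ps
  induction ps with
  | nil => intro u _; rfl
  | cons kv' ps' ih =>
    intro u h
    have hmem := h kv' (by simp)
    have hk' := pvTrans_keys_ne_nil kv' hmem
    show ps'.foldl pvRep (PySem.Chars.replace (v ++ u) kv'.1 kv'.2) =
      v ++ ps'.foldl pvRep (PySem.Chars.replace u kv'.1 kv'.2)
    rw [pv_replace_append kv'.1 kv'.2 hk' v u (pvF5 (k, v) hkv kv' hmem)]
    exact ih (PySem.Chars.replace u kv'.1 kv'.2) (fun x hx => h x (by simp [hx]))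

-- unfolding lemmas for pvScan
lemma pv_scan_some (s : List Char) (kv : List Char × List Char)
    (hf : pvTrans.find? (fun kv => kv.1.isPrefixOf s) = some kv) :
    pvScan s = kv.2 ++ pvScan (s.drop kv.1.length) := by
  rw [pvScan]
  split
  · rename_i kv' hf'
    rw [hf] at hf'
    cases hf'
    rfl
  · rename_i hf'
    rw [hf] at hf'
    cases hf'

lemma pv_scan_none_nil (hf : pvTrans.find? (fun kv => kv.1.isPrefixOf ([] : List Char)) = none) :
    pvScan [] = [] := by
  rw [pvScan]
  split
  · rename_i kv' hf'
    rw [hf] at hf'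
    cases hf'
  · rfl

lemma pv_scan_none_cons (c : Char) (t : List Char)
    (hf : pvTrans.find? (fun kv => kv.1.isPrefixOf (c :: t)) = none) :
    pvScan (c :: t) = c :: pvScan t := by
  rw [pvScan]
  split
  · rename_i kv' hf'
    rw [hf] at hf'
    cases hf'
  · rfl

-- the heart: the 19-pass replace chain equals the single scan
set_option maxHeartbeats 1000000 in
lemma pv_chain_eq_scan : ∀ (n : Nat) (s : List Char), s.length ≤ n →
    pvTrans.foldl pvRep s = pvScan s := by
  intro n
  induction n with
  | zero =>
    intro s hlen
    have : s = [] := List.eq_nil_of_length_eq_zero (Nat.le_zero.mp hlen)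
    subst this
    rw [pv_chain_nil pvTrans (fun x hx => hx),
        pv_scan_none_nil (List.find?_eq_none.mpr (fun kv hkv => by
          simp [List.isPrefixOf_iff_prefix, List.prefix_nil, pvTrans_keys_ne_nil kv hkv]))]
  | succ n ih =>
    intro s hlen
    cases hf : pvTrans.find? (fun kv => kv.1.isPrefixOf s) with
    | none =>
      have hnp : ∀ kv ∈ pvTrans, ¬ kv.1 <+: s := by
        intro kv hkv hp
        have := List.find?_eq_none.mp hf kv hkv
        simp [List.isPrefixOf_iff_prefix] at this
        exact this hp
      cases s with
      | nil => rw [pv_chain_nil pvTrans (fun x hx => hx), pv_scan_none_nil hf]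
      | cons c t =>
        have hscan := pv_scan_none_cons c t hf
        have hchain := pv_chain_cons c pvTrans t (fun x hx => hx) hnp
        have hih : pvTrans.foldl pvRep t = pvScan t := ih t (by simp at hlen; omega)
        rw [hscan, hchain, hih]
    | some kv =>
      have hmem := List.mem_of_find?_eq_some hf
      have hp : kv.1 <+: s := List.isPrefixOf_iff_prefix.mp (by simpa using List.find?_some hf)
      obtain ⟨t, rfl⟩ := hp
      have hk := pvTrans_keys_ne_nil kv hmem
      obtain ⟨ps₁, ps₂, hsplit⟩ := List.append_of_mem hmem
      have hmem₁ : ∀ x ∈ ps₁, x ∈ pvTrans := by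
        intro x hx; rw [hsplit]; simp [hx]
      have hmem₂ : ∀ x ∈ ps₂, x ∈ pvTrans := by
        intro x hx; rw [hsplit]; simp [hx]
      have hind₁ : ∀ x ∈ ps₁, x.1 ≠ [] ∧
          ∀ i < kv.1.length, ¬(x.1 <+: kv.1.drop i) ∧ ¬(kv.1.drop i <+: x.1) := by
        intro x hx
        refine ⟨pvTrans_keys_ne_nil x (hmem₁ x hx), ?_⟩
        have hpw := pvF4
        rw [hsplit] at hpw
        exact (List.pairwise_append.mp hpw).2.2 x hx kv (by simp)
      have hkv' : (kv.1, kv.2) ∈ pvTrans := by simpa using hmem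
      calc pvTrans.foldl pvRep (kv.1 ++ t)
          = ps₂.foldl pvRep (pvRep (ps₁.foldl pvRep (kv.1 ++ t)) kv) := by
            rw [hsplit]; simp [List.foldl_append]
        _ = ps₂.foldl pvRep (pvRep (kv.1 ++ ps₁.foldl pvRep t) kv) := by
            rw [pv_chain_key kv.1 ps₁ t hind₁]
        _ = ps₂.foldl pvRep (kv.2 ++ pvRep (ps₁.foldl pvRep t) kv) := by
            simp only [pvRep]
            rw [pv_replace_front kv.1 kv.2 _ hk]
        _ = kv.2 ++ ps₂.foldl pvRep (pvRep (ps₁.foldl pvRep t) kv) := by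
            rw [pv_chain_val kv.1 kv.2 hkv' ps₂ _ hmem₂]
        _ = kv.2 ++ pvTrans.foldl pvRep t := by
            rw [hsplit]; simp [List.foldl_append]
        _ = kv.2 ++ pvScan t := by
            rw [ih t (by
              have := List.length_pos_of_ne_nil hk
              simp at hlen; omega)]
        _ = pvScan (kv.1 ++ t) := by
            rw [pv_scan_some (kv.1 ++ t) kv hf, List.drop_left]

-- bridge from A's String-level fold to the char-level chain
lemma pv_stepA (s k v : String) (hk : k.toList ≠ []) :
    (pvStep s (k, v)).toList = PySem.Chars.replace s.toList k.toList v.toList := by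
  by_cases h : PySem.Str.isIn k s
  · have hb : PySem.Chars.isIn k.toList s.toList = true := by
      simpa [PySem.Str.isIn] using h
    simp [pvStep, PySem.Str.isIn, hb, PySem.Str.replace, String.toList_ofList]
  · have hb : PySem.Chars.isIn k.toList s.toList = false := by
      have hf : PySem.Str.isIn k s = false := by
        cases hc : PySem.Str.isIn k s
        · rfl
        · exact absurd hc h
      simpa [PySem.Str.isIn] using hf
    have hni : ¬ k.toList <:+: s.toList :=
      (PySem.Chars.isIn_eq_false_iff k.toList s.toList).mp hb
    simp [pvStep, PySem.Str.isIn, hb,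
      pv_replace_eq_self k.toList v.toList hk s.toList hni]

lemma pv_foldA : ∀ (ps : List (String × String)) (s : String),
    (∀ kv ∈ ps, kv.1.toList ≠ []) →
    (ps.foldl pvStep s).toList =
      (ps.map (fun kv => (kv.1.toList, kv.2.toList))).foldl pvRep s.toList := by
  intro ps
  induction ps with
  | nil => intro s _; rfl
  | cons kv ps' ih =>
    intro s h
    simp only [List.foldl_cons, List.map_cons]
    rw [ih _ (fun x hx => h x (by simp [hx]))]
    congr 1
    exact pv_stepA s kv.1 kv.2 (h kv (by simp))

lemma pv_pairs_eq :
    (pvDays ++ pvMonths).map (fun kv => (kv.1.toList, kv.2.toList)) = pvTrans := by decide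

lemma pv_keysAB : ∀ kv ∈ pvDays ++ pvMonths, kv.1.toList ≠ [] := by decide

-- ===== VERDICT (by name: the statement is the Claim_ definition above) =====
theorem translate_dutch_date_spec : Claim_equal_translate_dutch_date := by
  intro d _
  unfold Spec_translate_dutch_date translate_dutch_date translate_dutch_date_alt
  rw [← List.foldl_append]
  apply String.toList_inj.mp
  rw [pv_foldA (pvDays ++ pvMonths) d pv_keysAB, pv_pairs_eq, String.toList_ofList]
  exact pv_chain_eq_scan d.toList.length d.toList le_rfl
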